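-- pv_equiv track=rewrite | github.com/zzhuoxin1508/vllm-omni | vllm_omni/diffusion/models/z_image/z_image_transformer.py | _positive_divisors
-- ===== SOURCE A (Python) =====
-- import math
--
-- def _positive_divisors(n: int) -> set[int]:
--     if n <= 0:
--         return set()
--     divs: set[int] = set()
--     for d in range(1, int(math.isqrt(n)) + 1):
--         if n % d == 0:
--             divs.add(d)
--             divs.add(n // d)
--     return divs
-- ===== SOURCE B (Python) =====
-- import math
--
-- def _positive_divisors(n: int) -> set[int]:
--     # Divide-and-conquer: recursively split the candidate range [1, isqrt(n)+1)
--     # in half, concatenate the divisor-pair lists of the two halves, and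
--     # deduplicate once with a single set() call at the end (no set mutation).
--     def pairs(lo: int, hi: int) -> list[int]:
--         if hi <= lo:
--             return []
--         if hi - lo == 1:
--             return [lo, n // lo] if n % lo == 0 else []
--         mid = (lo + hi) // 2
--         return pairs(lo, mid) + pairs(mid, hi)
--     hi = math.isqrt(n) + 1 if n > 0 else 1
--     return set(pairs(1, hi))
-- ===== Notes on version B (the rewrite author's own statement) =====
-- stated objective: alternative
-- what changed: Replaces the imperative left-to-right isqrt-bounded loop that incrementally mutates a set with a divide-and-conquer recursion that splits the candidate range in half, concatenates the divisor-pair lists of the halves, and deduplicates once with a single set() call at the end.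
import Mathlib
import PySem

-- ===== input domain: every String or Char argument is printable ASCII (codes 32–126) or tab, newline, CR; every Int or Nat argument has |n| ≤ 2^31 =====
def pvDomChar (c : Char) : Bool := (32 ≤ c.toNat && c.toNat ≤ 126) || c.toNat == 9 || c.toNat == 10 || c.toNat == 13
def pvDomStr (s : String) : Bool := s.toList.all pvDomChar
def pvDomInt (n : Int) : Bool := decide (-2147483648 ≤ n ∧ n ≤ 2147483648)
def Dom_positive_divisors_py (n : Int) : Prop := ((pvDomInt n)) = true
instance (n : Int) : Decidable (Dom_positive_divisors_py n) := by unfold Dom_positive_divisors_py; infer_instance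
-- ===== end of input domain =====

-- B replaces A's imperative isqrt-bounded loop mutating a set with a divide-and-conquer recursion
-- over the candidate range, deduplicated once by a single set() call (same cost; objective: alternative).

-- ===== PORT A =====
-- int(math.isqrt(n)); Nat.sqrt is floor square root, exact for n ≥ 0 (A only calls it with n > 0)
def pvIsqrt (n : Int) : Int := (Int.toNat n).sqrt

def positive_divisors_py (n : Int) : List Int :=
  if n ≤ 0 then PySem.Set.empty
  else
    (PySem.List.pyRange 1 (pvIsqrt n + 1) 1).foldl
      (fun divs d =>
        if PySem.Int.mod n d == 0 then
          PySem.Set.add (PySem.Set.add divs d) (PySem.Int.floordiv n d)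
        else divs)
      PySem.Set.empty

-- ===== PORT B =====
-- the inner recursion 'pairs(lo, hi)' of Source B
def pvPairsDC (n lo hi : Int) : List Int :=
  if _h0 : hi ≤ lo then []
  else if _h1 : hi - lo = 1 then
    if PySem.Int.mod n lo == 0 then [lo, PySem.Int.floordiv n lo] else []
  else
    pvPairsDC n lo (PySem.Int.floordiv (lo + hi) 2) ++
    pvPairsDC n (PySem.Int.floordiv (lo + hi) 2) hi
termination_by (hi - lo).toNat
decreasing_by
  all_goals
    have hm : PySem.Int.floordiv (lo + hi) 2 = (lo + hi) / 2 := by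
      simp [PySem.Int.floordiv, Int.fdiv_eq_ediv]
    rw [hm]
    omega

def positive_divisors_py_alt (n : Int) : List Int :=
  let hi := if 0 < n then pvIsqrt n + 1 else 1
  PySem.Set.ofList (pvPairsDC n 1 hi)

-- ===== PRECONDITION & SPEC =====
def Spec_positive_divisors_py (n : Int) (out : List Int) : Prop := out = positive_divisors_py_alt n
instance (n : Int) (out : List Int) : Decidable (Spec_positive_divisors_py n out) := by unfold Spec_positive_divisors_py; infer_instance

-- ===== CLAIM (what is proved, stated in full; the proofs are below) =====
def Claim_equal_positive_divisors_py : Prop := ∀ (n : Int), Dom_positive_divisors_py n → Spec_positive_divisors_py n (positive_divisors_py n)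

-- ===== LEMMAS AND PROOFS =====

-- the contribution of one candidate d
def pvStep (n d : Int) : List Int :=
  if PySem.Int.mod n d == 0 then [d, PySem.Int.floordiv n d] else []

-- B's divide-and-conquer list is the flat contribution list of the whole range
theorem pvPairsDC_eq_flatMap (n lo hi : Int) :
    pvPairsDC n lo hi = (PySem.List.pyRange lo hi 1).flatMap (pvStep n) := by
  rw [pvPairsDC]
  split
  · rename_i h0
    have : PySem.List.pyRange lo hi 1 = [] := by
      rw [PySem.List.pyRange_one]
      have : (hi - lo).toNat = 0 := by omega
      simp [this]
    simp [this]
  · split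
    · rename_i h0 h1
      have : PySem.List.pyRange lo hi 1 = [lo] := by
        rw [PySem.List.pyRange_one]
        have : (hi - lo).toNat = 1 := by omega
        simp [this]
      simp [this, pvStep]
    · rename_i h0 h1
      have hm : PySem.Int.floordiv (lo + hi) 2 = (lo + hi) / 2 := by
        simp [PySem.Int.floordiv, Int.fdiv_eq_ediv]
      have hsplit : PySem.List.pyRange lo hi 1 =
          PySem.List.pyRange lo (PySem.Int.floordiv (lo + hi) 2) 1 ++
          PySem.List.pyRange (PySem.Int.floordiv (lo + hi) 2) hi 1 := by
        refine PySem.List.pyRange_one_append lo _ hi ?_ ?_ <;> rw [hm] <;> omega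
      rw [hsplit, List.flatMap_append,
        pvPairsDC_eq_flatMap n lo (PySem.Int.floordiv (lo + hi) 2),
        pvPairsDC_eq_flatMap n (PySem.Int.floordiv (lo + hi) 2) hi]
termination_by (hi - lo).toNat
decreasing_by
  all_goals
    have hm : PySem.Int.floordiv (lo + hi) 2 = (lo + hi) / 2 := by
      simp [PySem.Int.floordiv, Int.fdiv_eq_ediv]
    rw [hm]
    omega

-- A's fold adds, per candidate, exactly the elements of pvStep
theorem pv_foldl_flat (n : Int) (l : List Int) (s : PySem.Set Int) :
    l.foldl
      (fun divs d =>
        if PySem.Int.mod n d == 0 then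
          PySem.Set.add (PySem.Set.add divs d) (PySem.Int.floordiv n d)
        else divs) s
    = (l.flatMap (pvStep n)).foldl PySem.Set.add s := by
  induction l generalizing s with
  | nil => rfl
  | cons d l ih =>
    rw [List.foldl_cons, List.flatMap_cons, List.foldl_append, ih]
    by_cases hm : PySem.Int.mod n d == 0 <;> simp [pvStep, hm]

-- ===== VERDICT (by name: the statement is the Claim_ definition above) =====
theorem positive_divisors_py_spec : Claim_equal_positive_divisors_py := by
  intro n _
  unfold Spec_positive_divisors_py positive_divisors_py positive_divisors_py_alt
  rw [PySem.Set.ofList_eq_foldl]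
  split
  · rename_i hn
    -- n ≤ 0: B's range is [1, 1), the recursion returns [] at once
    have h0 : ¬ (0 : Int) < n := by omega
    simp only [h0, if_false]
    rw [pvPairsDC]
    simp [PySem.Set.empty]
  · rename_i hn
    have h0 : (0 : Int) < n := by omega
    simp only [h0, if_true]
    rw [pv_foldl_flat, pvPairsDC_eq_flatMap]
    rfl
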